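-- pv_equiv track=rewrite | github.com/AnShen95/CS330 | code/MAML_Proto/submission/load_data.py | DataSize
-- ===== SOURCE A (Python) =====
-- def DataSize(data):
--     negative_count = 0
--     positive_count = 0
--     for year in data:
--         for a_company, value in year.items():
--             if value[1][0] == 0:
--                 negative_count = negative_count + 1
--             else:
--                 positive_count = positive_count + 1
--
--     return negative_count, positive_count
-- ===== SOURCE B (Python) =====
-- def DataSize(data):
--     values = [value for year in data for value in year.values()]
--
--     def count(lo, hi):
--         if hi - lo == 0:
--             return (0, 0)
--         if hi - lo == 1:
--             return (1, 0) if values[lo][1][0] == 0 else (0, 1)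
--         mid = (lo + hi) // 2
--         n1, p1 = count(lo, mid)
--         n2, p2 = count(mid, hi)
--         return (n1 + n2, p1 + p2)
--
--     return count(0, len(values))
-- ===== Notes on version B (the rewrite author's own statement) =====
-- stated objective: alternative
-- what changed: Flattens all dict values into one list and counts negatives/positives by divide-and-conquer recursion (splitting the index range in half and adding the two pair results), instead of A's nested loops with two running if/else counters.
import Mathlib
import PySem

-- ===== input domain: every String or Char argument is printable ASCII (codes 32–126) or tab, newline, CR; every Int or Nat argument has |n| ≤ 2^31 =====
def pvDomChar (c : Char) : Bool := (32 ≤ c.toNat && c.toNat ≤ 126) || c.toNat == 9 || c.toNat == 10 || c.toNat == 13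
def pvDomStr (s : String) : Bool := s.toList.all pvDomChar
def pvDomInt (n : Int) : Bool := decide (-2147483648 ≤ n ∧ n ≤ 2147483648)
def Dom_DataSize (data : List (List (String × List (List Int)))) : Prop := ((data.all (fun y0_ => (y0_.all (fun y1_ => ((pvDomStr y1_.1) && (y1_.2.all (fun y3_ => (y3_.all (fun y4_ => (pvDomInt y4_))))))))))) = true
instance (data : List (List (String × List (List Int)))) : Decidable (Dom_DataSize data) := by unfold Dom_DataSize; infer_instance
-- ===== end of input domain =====

-- B flattens the dict values and counts by divide-and-conquer recursion (halving the list and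
-- adding the two (neg,pos) pairs) instead of A's nested loops with two running counters; return value only.
-- shared helper: the Python test `value[1][0] == 0` (none when an index is out of range, i.e. Python raises)
def pvIsNeg (v : List (List Int)) : Bool :=
  ((PySem.List.pyGet? v 1).bind (fun l => PySem.List.pyGet? l 0)) == some 0

-- ===== PORT A =====
def DataSize (data : List (List (String × List (List Int)))) : Int × Int :=
  data.foldl (fun (acc : Int × Int) year =>
    year.foldl (fun (acc : Int × Int) kv =>
      if pvIsNeg kv.2 then (acc.1 + 1, acc.2) else (acc.1, acc.2 + 1)) acc) (0, 0)

-- ===== PORT B =====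
-- Source B's `count(lo, hi)` on the slice values[lo:hi], ported as recursion on that sublist
def pvDcCount (values : List (List (List Int))) : Int × Int :=
  match _h : values with
  | [] => (0, 0)
  | [v] => if pvIsNeg v then (1, 0) else (0, 1)
  | _ :: _ :: _ =>
    let mid := values.length / 2
    let l := pvDcCount (values.take mid)
    let r := pvDcCount (values.drop mid)
    (l.1 + r.1, l.2 + r.2)
termination_by values.length
decreasing_by
  · simp_all [List.length_take]; omega
  · simp_all [List.length_drop]; omega

def DataSize_alt (data : List (List (String × List (List Int)))) : Int × Int :=
  pvDcCount (data.flatMap (fun year => year.map Prod.snd))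

-- ===== PRECONDITION & SPEC =====
-- Pre_ excludes (i) entries on which Python raises IndexError (value has fewer than 2 rows, or value[1] is empty)
-- and (ii) years with duplicate company keys, which a Python dict cannot represent (the assoc list models a dict).
def Pre_DataSize (data : List (List (String × List (List Int)))) : Prop :=
  ∀ year ∈ data, (year.map Prod.fst).Nodup ∧
    ∀ kv ∈ year, 2 ≤ kv.2.length ∧ kv.2.getD 1 [] ≠ []
instance (data : List (List (String × List (List Int)))) : Decidable (Pre_DataSize data) := by
  unfold Pre_DataSize; infer_instance

def pvWitness_DataSize : (List (List (String × List (List Int)))) :=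
  [[("a", [[1], [0, 2]]), ("b", [[0], [3]])], [("c", [[5], [7]])]]

def Spec_DataSize (data : List (List (String × List (List Int)))) (out : Int × Int) : Prop := out = DataSize_alt data
instance (data : List (List (String × List (List Int)))) (out : Int × Int) : Decidable (Spec_DataSize data out) := by unfold Spec_DataSize; infer_instance

-- ===== CLAIM (what is proved, stated in full; the proofs are below) =====
def Claim_equal_DataSize : Prop := ∀ (data : List (List (String × List (List Int)))), Dom_DataSize data → Pre_DataSize data → Spec_DataSize data (DataSize data)

-- ===== LEMMAS AND PROOFS =====

-- the divide-and-conquer count equals (number of negatives, number of the rest)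
lemma pvDcCount_eq (values : List (List (List Int))) :
    pvDcCount values
    = ((values.countP pvIsNeg : Int), (values.length : Int) - (values.countP pvIsNeg : Int)) := by
  induction values using pvDcCount.induct with
  | case1 => simp [pvDcCount]
  | case2 v h => simp [pvDcCount, h]
  | case3 v h => simp [pvDcCount, h]
  | case4 a b rest mid ihl ihr =>
    rw [pvDcCount]
    simp only [show mid = (a :: b :: rest).length / 2 from rfl] at ihl ihr
    rw [ihl, ihr]
    have hsplit := List.take_append_drop ((a :: b :: rest).length / 2) (a :: b :: rest)
    have hc : ((a :: b :: rest).take ((a :: b :: rest).length / 2)).countP pvIsNeg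
        + ((a :: b :: rest).drop ((a :: b :: rest).length / 2)).countP pvIsNeg
        = (a :: b :: rest).countP pvIsNeg := by
      rw [← List.countP_append, hsplit]
    have hl : ((a :: b :: rest).take ((a :: b :: rest).length / 2)).length
        + ((a :: b :: rest).drop ((a :: b :: rest).length / 2)).length
        = (a :: b :: rest).length := by
      rw [← List.length_append, hsplit]
    simp only [Prod.mk.injEq]
    omega

-- inner loop of A from accumulator (a, b)
lemma DataSize_inner (year : List (String × List (List Int))) (a b : Int) :
    year.foldl (fun (acc : Int × Int) kv =>
      if pvIsNeg kv.2 then (acc.1 + 1, acc.2) else (acc.1, acc.2 + 1)) (a, b)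
    = (a + ((year.map Prod.snd).countP pvIsNeg : Int),
       b + ((year.length : Int) - ((year.map Prod.snd).countP pvIsNeg : Int))) := by
  induction year generalizing a b with
  | nil => simp
  | cons kv rest ih =>
    simp only [List.foldl_cons, List.map_cons, List.countP_cons, List.length_cons]
    by_cases h : pvIsNeg kv.2 = true
    · rw [if_pos h, ih]; simp [h]; ring
    · rw [if_neg h, ih]; simp [h]; ring

-- outer loop of A from (a, b)
lemma DataSize_outer (data : List (List (String × List (List Int)))) (a b : Int) :
    data.foldl (fun (acc : Int × Int) year =>
      year.foldl (fun (acc : Int × Int) kv =>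
        if pvIsNeg kv.2 then (acc.1 + 1, acc.2) else (acc.1, acc.2 + 1)) acc) (a, b)
    = (a + (((data.flatMap (fun year => year.map Prod.snd)).countP pvIsNeg : Nat) : Int),
       b + (((data.flatMap (fun year => year.map Prod.snd)).length : Nat) : Int)
         - (((data.flatMap (fun year => year.map Prod.snd)).countP pvIsNeg : Nat) : Int)) := by
  induction data generalizing a b with
  | nil => simp
  | cons year rest ih =>
    simp only [List.foldl_cons, List.flatMap_cons, List.countP_append, List.length_append]
    rw [DataSize_inner, ih]
    simp only [Prod.mk.injEq, List.length_map]
    constructor <;> (push_cast; ring)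

-- ===== VERDICT (by name: the statement is the Claim_ definition above) =====
theorem DataSize_spec : Claim_equal_DataSize := by
  intro data _ _
  unfold Spec_DataSize DataSize DataSize_alt
  rw [DataSize_outer, pvDcCount_eq]
  simp only [Prod.mk.injEq]
  constructor <;> ring
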